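-- pv_equiv track=rewrite | github.com/Maciek998/so_project_term3rd_3 | page_replacement.py | fifo
-- ===== SOURCE A (Python) =====
-- def fifo(pages, frame_count):
--     """
--     Implementacja algorytmu FIFO (First-In-First-Out) do zastępowania stron.
--
--     :param pages: Lista odwołań do stron.
--     :param frame_count: Liczba dostępnych ramek.
--     :return: Całkowita liczba błędów stron (page faults).
--     """
--     frame = []  # Lista reprezentująca ramki pamięci.
--     faults = 0  # Licznik błędów stron.
--
--     for page in pages:  # Iteracja przez każdą stronę.
--         if page not in frame:  # Sprawdza, czy strona nie znajduje się już w ramce.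
--             if len(frame) == frame_count:  # Jeśli ramki są pełne,
--                 frame.pop(0)  # Usuwa najstarszą stronę (pierwszą dodaną).
--             frame.append(page)  # Dodaje nową stronę do ramek.
--             faults += 1  # Zwiększa licznik błędów stron.
--     return faults  # Zwraca całkowitą liczbę błędów stron.
-- ===== SOURCE B (Python) =====
-- def fifo(pages, frame_count):
--     frame = []       # circular buffer of resident pages
--     resident = set() # fast membership test
--     idx = 0          # oldest slot = next slot to overwrite
--     faults = 0
--     for page in pages:
--         if page not in resident:
--             faults += 1
--             if len(frame) == frame_count:
--                 resident.discard(frame[idx])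
--                 frame[idx] = page
--                 resident.add(page)
--                 idx = (idx + 1) % frame_count
--             else:
--                 frame.append(page)
--                 resident.add(page)
--     return faults
-- ===== Notes on version B (the rewrite author's own statement) =====
-- stated objective: faster
-- what changed: Replaces A's shifting list (pop(0) plus a linear 'in' scan per page) by a circular buffer with a write cursor plus a hash set for residency, so eviction is an O(1) in-place overwrite and membership an O(1) set lookup.
import Mathlib
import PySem

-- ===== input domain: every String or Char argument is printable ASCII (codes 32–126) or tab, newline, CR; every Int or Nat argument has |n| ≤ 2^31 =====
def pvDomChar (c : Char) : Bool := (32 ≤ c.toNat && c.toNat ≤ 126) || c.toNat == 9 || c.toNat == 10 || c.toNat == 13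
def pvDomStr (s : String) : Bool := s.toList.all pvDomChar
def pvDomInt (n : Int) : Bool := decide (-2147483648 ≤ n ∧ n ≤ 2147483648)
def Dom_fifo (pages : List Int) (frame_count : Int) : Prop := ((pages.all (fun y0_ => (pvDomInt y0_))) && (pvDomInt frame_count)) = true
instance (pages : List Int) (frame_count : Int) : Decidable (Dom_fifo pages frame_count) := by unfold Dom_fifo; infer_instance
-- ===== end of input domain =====

-- B replaces A's shifting frame list (pop(0) + linear membership scan) by a circular buffer
-- with a write cursor plus a set for residency; same fault count on all inputs where A returns.


-- ===== PORT A =====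
-- one loop iteration of A: state = (frame, faults).
-- 'frame.pop(0)' is 'drop 1'; it raises IndexError on an empty frame (frame_count = 0,
-- excluded by Pre_fifo), where 'drop 1' silently yields [].
def fifoStep (frame_count : Int) (st : List Int × Int) (page : Int) : List Int × Int :=
  if page ∈ st.1 then st
  else
    let frame := if (st.1.length : Int) = frame_count then st.1.drop 1 else st.1
    (frame ++ [page], st.2 + 1)

def fifo (pages : List Int) (frame_count : Int) : Int :=
  (pages.foldl (fifoStep frame_count) ([], 0)).2

-- ===== PORT B =====
-- one loop iteration of B: state = (frame, idx, resident, faults).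
-- 'frame[idx]' read/write: idx stays in [0, frame.length) whenever the full branch runs
-- (Pre_fifo excludes frame_count = 0 with nonempty pages, where Python raises IndexError),
-- so pyGetD/pySetD are exact there.
def fifoAltStep (frame_count : Int) (st : List Int × Int × PySem.Set Int × Int) (page : Int) :
    List Int × Int × PySem.Set Int × Int :=
  let (frame, idx, resident, faults) := st
  if PySem.Set.contains resident page then st
  else
    if (frame.length : Int) = frame_count then
      let old := PySem.List.pyGetD frame idx 0
      (PySem.List.pySetD frame idx page,
       PySem.Int.mod (idx + 1) frame_count,
       PySem.Set.add (PySem.Set.discard resident old) page,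
       faults + 1)
    else
      (frame ++ [page], idx, PySem.Set.add resident page, faults + 1)

def fifo_alt (pages : List Int) (frame_count : Int) : Int :=
  (pages.foldl (fifoAltStep frame_count) ([], 0, PySem.Set.empty, 0)).2.2.2

-- ===== PRECONDITION & SPEC =====
-- Pre_ excludes only frame_count = 0 with a nonempty page list: there both A
-- (frame.pop(0) on an empty list) and B (frame[idx] on an empty list) raise IndexError.
def Pre_fifo (pages : List Int) (frame_count : Int) : Prop :=
  frame_count = 0 → pages = []
instance (pages : List Int) (frame_count : Int) : Decidable (Pre_fifo pages frame_count) := by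
  unfold Pre_fifo; infer_instance

def pvWitness_fifo : List Int × Int := ([1, 2, 3, 1, 4, 1], 2)

def Spec_fifo (pages : List Int) (frame_count : Int) (out : Int) : Prop := out = fifo_alt pages frame_count
instance (pages : List Int) (frame_count : Int) (out : Int) : Decidable (Spec_fifo pages frame_count out) := by unfold Spec_fifo; infer_instance

-- ===== CLAIM (what is proved, stated in full; the proofs are below) =====
def Claim_equal_fifo : Prop := ∀ (pages : List Int) (frame_count : Int), Dom_fifo pages frame_count → Pre_fifo pages frame_count → Spec_fifo pages frame_count (fifo pages frame_count)

-- ===== LEMMAS AND PROOFS =====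

-- relation between A's state (f, c) and B's state (b, i, s, c'):
-- f is b rotated by the cursor, s holds exactly f's elements, f has no duplicates.
def FifoInv (frame_count : Int) (a : List Int × Int) (bst : List Int × Int × PySem.Set Int × Int) : Prop :=
  let (f, c) := a
  let (b, i, s, c') := bst
  c' = c ∧
  0 ≤ i ∧
  f = b.drop i.toNat ++ b.take i.toNat ∧
  ((b.length : Int) = frame_count ∧ i.toNat < b.length ∨ i = 0) ∧
  (∀ x : Int, x ∈ s ↔ x ∈ f) ∧
  f.Nodup

theorem fifoInv_init (frame_count : Int) :
    FifoInv frame_count ([], 0) ([], 0, PySem.Set.empty, 0) := by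
  simp [FifoInv, PySem.Set.empty]

theorem fifoInv_step (frame_count : Int) (hfc : frame_count ≠ 0)
    (a : List Int × Int) (bst : List Int × Int × PySem.Set Int × Int)
    (h : FifoInv frame_count a bst) (page : Int) :
    FifoInv frame_count (fifoStep frame_count a page) (fifoAltStep frame_count bst page) := by
  obtain ⟨f, c⟩ := a
  obtain ⟨b, i, s, c'⟩ := bst
  obtain ⟨hc, hi0, hrot, hdisj, hmem, hnd⟩ := h
  have hcontains : PySem.Set.contains s page = decide (page ∈ f) := by
    by_cases hp : page ∈ f
    · have hin := (PySem.Set.contains_iff s page).2 ((hmem page).2 hp)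
      rw [hin]; simp [hp]
    · simp only [hp, decide_false]
      by_contra hco
      simp only [Bool.not_eq_false] at hco
      exact hp ((hmem page).1 ((PySem.Set.contains_iff s page).1 hco))
  by_cases hp : page ∈ f
  · -- hit: both states unchanged
    simp only [fifoStep, fifoAltStep, hcontains, hp, if_pos, decide_true]
    exact ⟨hc, hi0, hrot, hdisj, hmem, hnd⟩
  · -- miss
    have hlen : f.length = b.length := by
      subst hrot; simp; omega
    by_cases hfull : (b.length : Int) = frame_count
    · -- full: A drops the head, B overwrites at the cursor
      have hk : i.toNat < b.length := by
        rcases hdisj with ⟨_, hk⟩ | hi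
        · exact hk
        · subst hi
          have hb0 : b.length ≠ 0 := by
            intro h0; rw [h0] at hfull; exact hfc hfull.symm
          simp; omega
      set k := i.toNat with hkdef
      have hik : i = (k : Int) := by omega
      have hflen : (f.length : Int) = frame_count := by rw [hlen]; exact hfull
      have hbpos : 0 < frame_count := by omega
      have hdropk : b.drop k = b[k] :: b.drop (k+1) := List.drop_eq_getElem_cons hk
      have hf : f = b[k] :: (b.drop (k+1) ++ b.take k) := by
        rw [hrot, hdropk]; rfl
      have hpyget : PySem.List.pyGetD b i 0 = b[k] := by
        rw [hik, PySem.List.pyGetD_natCast]; exact List.getD_eq_getElem b 0 hk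
      have hset : PySem.List.pySetD b i page = b.take k ++ page :: b.drop (k+1) := by
        rw [PySem.List.pySetD_of_nonneg b page hi0, ← hkdef,
          List.set_eq_take_append_cons_drop, if_pos hk]
      have hmod : PySem.Int.mod (i + 1) frame_count
          = if ((k+1 : Nat) : Int) = frame_count then 0 else ((k+1 : Nat) : Int) := by
        rw [PySem.Int.mod_eq_emod_of_pos hbpos, hik]
        by_cases hce : ((k+1 : Nat) : Int) = frame_count
        · rw [if_pos hce]
          have : (k : Int) + 1 = frame_count := by exact_mod_cast hce
          rw [this, Int.emod_self]
        · rw [if_neg hce]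
          have h1 : (0 : Int) ≤ (k : Int) + 1 := by omega
          have h2 : (k : Int) + 1 < frame_count := by
            have : (k : Int) + 1 ≤ frame_count := by omega
            omega
          rw [Int.emod_eq_of_lt h1 h2]; push_cast; ring
      -- the two new states
      simp only [fifoStep, fifoAltStep, hcontains, hp, decide_false, Bool.false_eq_true,
        if_false, hflen, hfull, if_pos, hpyget, hset, hmod]
      have hfd : f.drop 1 = b.drop (k+1) ++ b.take k := by rw [hf]; rfl
      have hmem' : ∀ x : Int,
          x ∈ PySem.Set.add (PySem.Set.discard s b[k]) page ↔ x ∈ f.drop 1 ++ [page] := by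
        intro x
        rw [PySem.Set.mem_add, PySem.Set.mem_discard, hmem x]
        have hnr : b[k] ∉ b.drop (k+1) ++ b.take k := by
          rw [hf] at hnd; exact (List.nodup_cons.1 hnd).1
        rw [hfd]
        constructor
        · rintro (⟨hxf, hxo⟩ | hxp)
          · rw [hf] at hxf
            rcases List.mem_cons.1 hxf with h1 | h2
            · exact absurd h1 hxo
            · exact List.mem_append_left _ h2
          · simp [hxp]
        · intro hx
          rcases List.mem_append.1 hx with h1 | h2
          · left
            refine ⟨by rw [hf]; exact List.mem_cons_of_mem _ h1, ?_⟩
            intro hxe; rw [hxe] at h1; exact hnr h1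
          · right; simpa using h2
      have hnd' : (f.drop 1 ++ [page]).Nodup := by
        rw [hfd]
        have hnd2 : (b.drop (k+1) ++ b.take k).Nodup := by
          rw [hf] at hnd; exact (List.nodup_cons.1 hnd).2
        have hpn : page ∉ b.drop (k+1) ++ b.take k := by
          intro hx; exact hp (by rw [hf]; exact List.mem_cons_of_mem _ hx)
        refine hnd2.append (List.nodup_singleton page) ?_
        intro a ha hb
        rw [List.mem_singleton] at hb
        subst hb
        exact hpn ha
      by_cases hcase : ((k+1 : Nat) : Int) = frame_count
      · -- cursor wraps to 0
        rw [if_pos hcase]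
        have hkL : k + 1 = b.length := by omega
        have hdnil : b.drop (k+1) = [] := by rw [hkL]; simp
        refine ⟨by rw [hc], le_refl 0, ?_, Or.inr rfl, hmem', hnd'⟩
        simp only [Int.toNat_zero, List.drop_zero, List.take_zero, List.append_nil]
        rw [hfd, hdnil]; simp
      · -- cursor advances to k+1
        rw [if_neg hcase]
        have hkL : k + 1 < b.length := by omega
        have hlen' : (b.take k ++ page :: b.drop (k+1)).length = b.length := by
          simp; omega
        refine ⟨by rw [hc], by positivity, ?_, Or.inl ⟨by rw [hlen']; exact hfull, ?_⟩, hmem', hnd'⟩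
        · have htk : (b.take k).length = k := by simp; omega
          have hX : List.take k b ++ page :: List.drop (k+1) b
              = (List.take k b ++ [page]) ++ List.drop (k+1) b := by simp
          rw [hfd, Int.toNat_natCast, hX,
            List.drop_left' (by simp [htk] : (List.take k b ++ [page]).length = k+1),
            List.take_left' (by simp [htk] : (List.take k b ++ [page]).length = k+1)]
          simp
        · rw [hlen', Int.toNat_natCast]; omega
    · -- not full: both append; cursor must be 0
      have hi : i = 0 := by
        rcases hdisj with ⟨hfl, _⟩ | hi
        · exact absurd hfl hfull
        · exact hi
      subst hi
      have hfb : f = b := by simpa using hrot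
      subst hfb
      have hflen : ¬ ((f.length : Int) = frame_count) := hfull
      simp only [fifoStep, fifoAltStep, hcontains, hp, decide_false, Bool.false_eq_true,
        if_false, hflen]
      refine ⟨by rw [hc], le_refl 0, by simp, Or.inr rfl, ?_, ?_⟩
      · intro x
        rw [PySem.Set.mem_add, hmem x]
        simp
      · refine hnd.append (List.nodup_singleton page) ?_
        intro a ha hb
        rw [List.mem_singleton] at hb
        subst hb
        exact hp ha

theorem fifoInv_foldl (frame_count : Int) (hfc : frame_count ≠ 0) (pages : List Int)
    (a : List Int × Int) (bst : List Int × Int × PySem.Set Int × Int)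
    (h : FifoInv frame_count a bst) :
    FifoInv frame_count (pages.foldl (fifoStep frame_count) a)
      (pages.foldl (fifoAltStep frame_count) bst) := by
  induction pages generalizing a bst with
  | nil => exact h
  | cons p ps ih => exact ih _ _ (fifoInv_step frame_count hfc a bst h p)

-- ===== VERDICT (by name: the statement is the Claim_ definition above) =====
theorem fifo_spec : Claim_equal_fifo := by
  intro pages frame_count _ hpre
  unfold Spec_fifo fifo fifo_alt
  by_cases hfc : frame_count = 0
  · rw [hpre hfc]; rfl
  · exact ((fifoInv_foldl frame_count hfc pages _ _ (fifoInv_init frame_count)).1).symm
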